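-- pv_equiv track=rewrite | github.com/lamhoang195/Test-Attention | check.py | write_samples
-- ===== SOURCE A (Python) =====
-- from typing import List, Dict, Optional
--
-- def write_samples(samples: List[Dict[str, Optional[str]]]) -> List[str]:
--     out: List[str] = []
--     for idx, s in enumerate(samples, start=1):
--         out.append(f"--sample {idx}--")
--         if s.get("input") is not None:
--             out.append(f"Input: {s['input']}")
--         if s.get("output") is not None:
--             out.append(f"Output: {s['output']}")
--         if s.get("score") is not None:
--             out.append(f"Score: {s['score']}")
--         if s.get("detected") is not None:
--             out.append(f"Detected Injection: {s['detected']}")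
--         if s.get("check") is not None:
--             out.append(f"Check: {s['check']}")
--         out.append("")
--     return out
-- ===== SOURCE B (Python) =====
-- from typing import List, Dict, Optional
--
-- def _block(idx: int, s: Dict[str, Optional[str]]) -> List[str]:
--     # candidate (label, value) pairs are computed eagerly, then filtered
--     pairs = [("Input", s.get("input")),
--              ("Output", s.get("output")),
--              ("Score", s.get("score")),
--              ("Detected Injection", s.get("detected")),
--              ("Check", s.get("check"))]
--     return ["--sample %d--" % idx] + \
--            ["%s: %s" % (lab, v) for lab, v in pairs if v is not None] + [""]
--
-- def write_samples(samples: List[Dict[str, Optional[str]]]) -> List[str]: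
--     # recursion over the samples, concatenating whole per-sample blocks (no accumulator)
--     def go(idx: int, rest: List[Dict[str, Optional[str]]]) -> List[str]:
--         if not rest:
--             return []
--         return _block(idx, rest[0]) + go(idx + 1, rest[1:])
--     return go(1, samples)
-- ===== Notes on version B (the rewrite author's own statement) =====
-- stated objective: alternative
-- what changed: B is recursive and stage-based: per sample it eagerly computes the five (label, value) pairs, filters out the None values in one comprehension, and concatenates whole blocks by structural recursion, instead of A's single-pass loop appending through five unrolled conditionals.
import Mathlib
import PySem

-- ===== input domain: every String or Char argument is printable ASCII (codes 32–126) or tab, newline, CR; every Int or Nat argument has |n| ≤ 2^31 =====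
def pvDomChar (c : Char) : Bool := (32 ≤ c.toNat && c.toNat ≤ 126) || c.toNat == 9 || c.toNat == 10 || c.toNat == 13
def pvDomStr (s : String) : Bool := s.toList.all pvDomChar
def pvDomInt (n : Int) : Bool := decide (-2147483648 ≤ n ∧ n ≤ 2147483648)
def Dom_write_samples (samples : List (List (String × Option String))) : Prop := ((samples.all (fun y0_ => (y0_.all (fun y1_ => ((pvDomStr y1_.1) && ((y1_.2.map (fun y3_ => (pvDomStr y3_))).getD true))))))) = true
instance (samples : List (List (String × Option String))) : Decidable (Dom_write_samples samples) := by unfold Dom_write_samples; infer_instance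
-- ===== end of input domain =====

-- B rebuilds the output by structural recursion over the samples, concatenating whole per-sample
-- blocks that are produced by filtering eagerly computed (label, value) pairs (alternative decomposition; same output).

-- ===== PORT A =====
-- loop body of A: appends the header, then the five conditionals in source order, then the separator
def pvBodyA (out : List String) (idx : Int) (s : List (String × Option String)) : List String :=
  let out := out ++ ["--sample " ++ PySem.Int.toStr idx ++ "--"]
  let out := match PySem.Dict.getD (PySem.Dict.mk s) "input" none with
    | some v => out ++ ["Input: " ++ v]
    | none => out
  let out := match PySem.Dict.getD (PySem.Dict.mk s) "output" none with
    | some v => out ++ ["Output: " ++ v]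
    | none => out
  let out := match PySem.Dict.getD (PySem.Dict.mk s) "score" none with
    | some v => out ++ ["Score: " ++ v]
    | none => out
  let out := match PySem.Dict.getD (PySem.Dict.mk s) "detected" none with
    | some v => out ++ ["Detected Injection: " ++ v]
    | none => out
  let out := match PySem.Dict.getD (PySem.Dict.mk s) "check" none with
    | some v => out ++ ["Check: " ++ v]
    | none => out
  out ++ [""]

def write_samples (samples : List (List (String × Option String))) : List String :=
  (PySem.List.enumerate samples 1).foldl (fun out p => pvBodyA out p.1 p.2) []

-- ===== PORT B =====
-- B's _block: eagerly computed (label, value) pairs, then one filtering comprehension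
def pvBlockB (idx : Int) (s : List (String × Option String)) : List String :=
  let pairs : List (String × Option String) :=
    [("Input", PySem.Dict.getD (PySem.Dict.mk s) "input" none),
     ("Output", PySem.Dict.getD (PySem.Dict.mk s) "output" none),
     ("Score", PySem.Dict.getD (PySem.Dict.mk s) "score" none),
     ("Detected Injection", PySem.Dict.getD (PySem.Dict.mk s) "detected" none),
     ("Check", PySem.Dict.getD (PySem.Dict.mk s) "check" none)]
  ["--sample " ++ PySem.Int.toStr idx ++ "--"] ++
    (pairs.filterMap (fun lv => lv.2.map (fun v => lv.1 ++ ": " ++ v))) ++ [""]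

-- B's inner recursion go(idx, rest)
def pvGoB (idx : Int) (rest : List (List (String × Option String))) : List String :=
  match rest with
  | [] => []
  | s :: rest' => pvBlockB idx s ++ pvGoB (idx + 1) rest'

def write_samples_alt (samples : List (List (String × Option String))) : List String :=
  pvGoB 1 samples

-- ===== PRECONDITION & SPEC =====
def Spec_write_samples (samples : List (List (String × Option String))) (out : List String) : Prop := out = write_samples_alt samples
instance (samples : List (List (String × Option String))) (out : List String) : Decidable (Spec_write_samples samples out) := by unfold Spec_write_samples; infer_instance

-- ===== CLAIM (what is proved, stated in full; the proofs are below) =====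
def Claim_equal_write_samples : Prop := ∀ (samples : List (List (String × Option String))), Dom_write_samples samples → Spec_write_samples samples (write_samples samples)

-- ===== LEMMAS AND PROOFS =====
theorem pvBodyA_eq_append (out : List String) (idx : Int) (s : List (String × Option String)) :
    pvBodyA out idx s = out ++ pvBlockB idx s := by
  simp only [pvBodyA, pvBlockB, List.filterMap]
  cases PySem.Dict.getD (PySem.Dict.mk s) "input" none <;>
    cases PySem.Dict.getD (PySem.Dict.mk s) "output" none <;>
    cases PySem.Dict.getD (PySem.Dict.mk s) "score" none <;>
    cases PySem.Dict.getD (PySem.Dict.mk s) "detected" none <;>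
    cases PySem.Dict.getD (PySem.Dict.mk s) "check" none <;> simp

theorem foldlA_eq_go (samples : List (List (String × Option String))) (idx : Int) (acc : List String) :
    (PySem.List.enumerate samples idx).foldl (fun out p => pvBodyA out p.1 p.2) acc
      = acc ++ pvGoB idx samples := by
  induction samples generalizing idx acc with
  | nil => simp [PySem.List.enumerate_nil, pvGoB]
  | cons s rest ih =>
      rw [PySem.List.enumerate_cons]
      simp only [List.foldl_cons, pvGoB]
      rw [ih, pvBodyA_eq_append, List.append_assoc]

-- ===== VERDICT (by name: the statement is the Claim_ definition above) =====
theorem write_samples_spec : Claim_equal_write_samples := by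
  intro samples _
  unfold Spec_write_samples write_samples write_samples_alt
  rw [foldlA_eq_go]
  simp
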